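-- pv_equiv track=rewrite | github.com/cj81499/advent-of-code | src/aoc_cj/aoc2016/day11.py | floor_is_safe
-- ===== SOURCE A (Python) =====
-- def items_on_floor(floor: int, item_pairs: tuple[tuple[int, int], ...]) -> set[tuple[int, int]]:
--     return {
--         (pair_i, item_i)
--         for pair_i, item_pair in enumerate(item_pairs)
--         for item_i, location in enumerate(item_pair)
--         if location == floor
--     }
--
-- def floor_is_safe(floor: int, item_locs: tuple[tuple[int, int], ...]) -> bool:
--     items = items_on_floor(floor, item_locs)
--     generators = {i[0] for i in items if i[1] == 0}
--     if len(generators) > 0: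
--         microchips = {i[0] for i in items if i[1] == 1}
--         unpaired_microchips = microchips - generators
--         if len(unpaired_microchips) > 0:
--             return False
--     return True
-- ===== SOURCE B (Python) =====
-- def floor_is_safe(floor: int, item_locs: tuple[tuple[int, int], ...]) -> bool:
--     has_generator = any(gen == floor for gen, chip in item_locs)
--     if not has_generator:
--         return True
--     return all(chip != floor or gen == floor for gen, chip in item_locs)
-- ===== Notes on version B (the rewrite author's own statement) =====
-- stated objective: simpler
-- what changed: Replaced the enumerate-index set comprehension plus set-difference machinery with a direct per-pair scan: one any() for a generator on the floor and one all() checking every chip on the floor has its generator there.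
import Mathlib
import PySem

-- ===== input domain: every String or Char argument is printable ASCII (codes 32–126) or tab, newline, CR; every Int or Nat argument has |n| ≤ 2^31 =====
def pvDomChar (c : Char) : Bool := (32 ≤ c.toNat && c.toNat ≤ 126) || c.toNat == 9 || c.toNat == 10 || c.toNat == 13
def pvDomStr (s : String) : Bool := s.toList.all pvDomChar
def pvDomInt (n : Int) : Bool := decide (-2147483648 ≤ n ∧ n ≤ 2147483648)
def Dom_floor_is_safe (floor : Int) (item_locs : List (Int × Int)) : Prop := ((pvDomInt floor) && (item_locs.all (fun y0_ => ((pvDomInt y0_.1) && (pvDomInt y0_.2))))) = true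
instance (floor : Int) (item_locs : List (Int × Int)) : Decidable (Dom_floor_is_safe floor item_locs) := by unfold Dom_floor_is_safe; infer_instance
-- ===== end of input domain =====

-- B replaces A's index-set construction and set difference by a direct per-pair scan (objective: simpler).

-- ===== PORT A =====
def items_on_floor (floor : Int) (item_pairs : List (Int × Int)) : PySem.Set (Int × Int) :=
  PySem.Set.ofList
    ((PySem.List.enumerate item_pairs).flatMap (fun pe =>
      (PySem.List.enumerate [pe.2.1, pe.2.2]).filterMap (fun ie =>
        if ie.2 == floor then some (pe.1, ie.1) else none)))

def floor_is_safe (floor : Int) (item_locs : List (Int × Int)) : Bool :=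
  let items := items_on_floor floor item_locs
  let generators : PySem.Set Int :=
    PySem.Set.ofList (items.filterMap (fun i => if i.2 == 0 then some i.1 else none))
  if PySem.Set.len generators > 0 then
    let microchips : PySem.Set Int :=
      PySem.Set.ofList (items.filterMap (fun i => if i.2 == 1 then some i.1 else none))
    let unpaired_microchips := PySem.Set.diff microchips generators
    if PySem.Set.len unpaired_microchips > 0 then false else true
  else true

-- ===== PORT B =====
def floor_is_safe_alt (floor : Int) (item_locs : List (Int × Int)) : Bool :=
  let has_generator := item_locs.any (fun p => p.1 == floor)
  if !has_generator then true
  else item_locs.all (fun p => p.2 != floor || p.1 == floor)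

-- ===== PRECONDITION & SPEC =====
def Spec_floor_is_safe (floor : Int) (item_locs : List (Int × Int)) (out : Bool) : Prop := out = floor_is_safe_alt floor item_locs
instance (floor : Int) (item_locs : List (Int × Int)) (out : Bool) : Decidable (Spec_floor_is_safe floor item_locs out) := by unfold Spec_floor_is_safe; infer_instance

-- ===== CLAIM (what is proved, stated in full; the proofs are below) =====
def Claim_equal_floor_is_safe : Prop := ∀ (floor : Int) (item_locs : List (Int × Int)), Dom_floor_is_safe floor item_locs → Spec_floor_is_safe floor item_locs (floor_is_safe floor item_locs)

-- ===== LEMMAS AND PROOFS =====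

theorem mem_items_on_floor (floor : Int) (xs : List (Int × Int)) (p : Int × Int) :
    p ∈ items_on_floor floor xs ↔
      ∃ (k : Nat) (h : k < xs.length),
        (p = ((k : Int), 0) ∧ xs[k].1 = floor) ∨ (p = ((k : Int), 1) ∧ xs[k].2 = floor) := by
  simp only [items_on_floor, PySem.Set.mem_ofList, List.mem_flatMap, List.mem_filterMap,
    PySem.List.mem_enumerate_iff]
  constructor
  · rintro ⟨pe, ⟨k, hk, rfl⟩, ie, ⟨j, hj, rfl⟩, hsome⟩
    split at hsome
    case isFalse => simp at hsome
    case isTrue h =>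
      rw [Option.some.injEq] at hsome
      subst hsome
      have hj2 : j < 2 := by simpa using hj
      interval_cases j
      · exact ⟨k, hk, Or.inl ⟨by simp, by simpa using h⟩⟩
      · exact ⟨k, hk, Or.inr ⟨by simp, by simpa using h⟩⟩
  · rintro ⟨k, hk, hcase⟩
    refine ⟨((k : Int), xs[k]), ⟨k, hk, by simp⟩, ?_⟩
    rcases hcase with ⟨rfl, hf⟩ | ⟨rfl, hf⟩
    · exact ⟨(0, xs[k].1), ⟨0, by simp, by simp⟩, by simp [hf]⟩
    · exact ⟨(1, xs[k].2), ⟨1, by simp, by simp⟩, by simp [hf]⟩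

theorem mem_gen (floor : Int) (xs : List (Int × Int)) (g : Int) :
    g ∈ PySem.Set.ofList ((items_on_floor floor xs).filterMap
        (fun i => if i.2 == 0 then some i.1 else none)) ↔
      ∃ (k : Nat) (_ : k < xs.length), g = (k : Int) ∧ xs[k].1 = floor := by
  simp only [PySem.Set.mem_ofList, List.mem_filterMap]
  constructor
  · rintro ⟨i, hi, hsome⟩
    rw [mem_items_on_floor] at hi
    obtain ⟨k, hk, hc⟩ := hi
    rcases hc with ⟨rfl, hf⟩ | ⟨rfl, hf⟩
    · simp only [beq_self_eq_true, if_true, Option.some.injEq] at hsome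
      exact ⟨k, hk, hsome.symm, hf⟩
    · simp at hsome
  · rintro ⟨k, hk, rfl, hf⟩
    exact ⟨((k : Int), 0), (mem_items_on_floor _ _ _).2 ⟨k, hk, Or.inl ⟨rfl, hf⟩⟩, by simp⟩

theorem mem_micro (floor : Int) (xs : List (Int × Int)) (g : Int) :
    g ∈ PySem.Set.ofList ((items_on_floor floor xs).filterMap
        (fun i => if i.2 == 1 then some i.1 else none)) ↔
      ∃ (k : Nat) (_ : k < xs.length), g = (k : Int) ∧ xs[k].2 = floor := by
  simp only [PySem.Set.mem_ofList, List.mem_filterMap]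
  constructor
  · rintro ⟨i, hi, hsome⟩
    rw [mem_items_on_floor] at hi
    obtain ⟨k, hk, hc⟩ := hi
    rcases hc with ⟨rfl, hf⟩ | ⟨rfl, hf⟩
    · simp at hsome
    · simp only [beq_self_eq_true, if_true, Option.some.injEq] at hsome
      exact ⟨k, hk, hsome.symm, hf⟩
  · rintro ⟨k, hk, rfl, hf⟩
    exact ⟨((k : Int), 1), (mem_items_on_floor _ _ _).2 ⟨k, hk, Or.inr ⟨rfl, hf⟩⟩, by simp⟩

theorem len_pos_iff_exists_mem {α : Type} (s : List α) :
    PySem.Set.len s > 0 ↔ ∃ x, x ∈ s := by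
  cases s <;> simp [PySem.Set.len]

theorem floor_is_safe_spec₀ (floor : Int) (xs : List (Int × Int)) :
    floor_is_safe floor xs = floor_is_safe_alt floor xs := by
  unfold floor_is_safe floor_is_safe_alt
  by_cases hg : ∃ p ∈ xs, p.1 = floor
  · have hgen : PySem.Set.len (PySem.Set.ofList ((items_on_floor floor xs).filterMap
        (fun i => if i.2 == 0 then some i.1 else none))) > 0 := by
      rw [len_pos_iff_exists_mem]
      obtain ⟨p, hp, hf⟩ := hg
      obtain ⟨k, hk, hpk⟩ := List.mem_iff_getElem.1 hp
      exact ⟨(k : Int), (mem_gen _ _ _).2 ⟨k, hk, rfl, by rw [hpk]; exact hf⟩⟩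
    have hany : xs.any (fun p => p.1 == floor) = true := by
      simp only [List.any_eq_true]
      obtain ⟨p, hp, hf⟩ := hg
      exact ⟨p, hp, by simp [hf]⟩
    rw [if_pos hgen, hany]
    simp only [Bool.not_true, Bool.false_eq_true, if_false]
    by_cases hu : ∃ p ∈ xs, p.2 = floor ∧ p.1 ≠ floor
    · have : PySem.Set.len (PySem.Set.diff
          (PySem.Set.ofList ((items_on_floor floor xs).filterMap
            (fun i => if i.2 == 1 then some i.1 else none)))
          (PySem.Set.ofList ((items_on_floor floor xs).filterMap
            (fun i => if i.2 == 0 then some i.1 else none)))) > 0 := by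
        rw [len_pos_iff_exists_mem]
        obtain ⟨p, hp, hc, hng⟩ := hu
        obtain ⟨k, hk, hpk⟩ := List.mem_iff_getElem.1 hp
        refine ⟨(k : Int), (PySem.Set.mem_diff _ _ _).2 ⟨(mem_micro _ _ _).2 ⟨k, hk, rfl, by rw [hpk]; exact hc⟩, ?_⟩⟩
        rw [mem_gen]
        rintro ⟨j, hj, hkj, hjf⟩
        have : j = k := by omega
        subst this; rw [hpk] at hjf; exact hng hjf
      rw [if_pos this]
      have : xs.all (fun p => p.2 != floor || p.1 == floor) = false := by
        simp only [List.all_eq_false]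
        obtain ⟨p, hp, hc, hng⟩ := hu
        exact ⟨p, hp, by simp [hc, hng]⟩
      rw [this]
    · have : ¬ PySem.Set.len (PySem.Set.diff
          (PySem.Set.ofList ((items_on_floor floor xs).filterMap
            (fun i => if i.2 == 1 then some i.1 else none)))
          (PySem.Set.ofList ((items_on_floor floor xs).filterMap
            (fun i => if i.2 == 0 then some i.1 else none)))) > 0 := by
        rw [len_pos_iff_exists_mem]
        rintro ⟨m, hm⟩
        obtain ⟨hmic, hngen⟩ := (PySem.Set.mem_diff _ _ _).1 hm
        obtain ⟨k, hk, rfl, hc⟩ := (mem_micro _ _ _).1 hmic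
        by_cases hgk : xs[k].1 = floor
        · exact hngen ((mem_gen _ _ _).2 ⟨k, hk, rfl, hgk⟩)
        · exact hu ⟨xs[k], List.getElem_mem hk, hc, hgk⟩
      rw [if_neg this]
      have : xs.all (fun p => p.2 != floor || p.1 == floor) = true := by
        simp only [List.all_eq_true]
        intro p hp
        by_cases hc : p.2 = floor
        · by_cases hgp : p.1 = floor
          · simp [hgp]
          · exact absurd ⟨p, hp, hc, hgp⟩ hu
        · simp [hc]
      rw [this]
  · have hgen : ¬ PySem.Set.len (PySem.Set.ofList ((items_on_floor floor xs).filterMap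
        (fun i => if i.2 == 0 then some i.1 else none))) > 0 := by
      rw [len_pos_iff_exists_mem]
      rintro ⟨g, hgm⟩
      obtain ⟨k, hk, rfl, hf⟩ := (mem_gen _ _ _).1 hgm
      exact hg ⟨xs[k], List.getElem_mem hk, hf⟩
    have hany : xs.any (fun p => p.1 == floor) = false := by
      simp only [List.any_eq_false]
      intro p hp
      simp only [beq_iff_eq]
      exact fun hf => hg ⟨p, hp, hf⟩
    rw [if_neg hgen, hany]
    simp

-- ===== VERDICT (by name: the statement is the Claim_ definition above) =====
theorem floor_is_safe_spec : Claim_equal_floor_is_safe := by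
  intro floor item_locs _
  exact floor_is_safe_spec₀ floor item_locs
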